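-- pv_equiv track=rewrite | github.com/archie-m-vist/urist-dicehammer | plugins/dicehammer.py | run_sets
-- ===== SOURCE A (Python) =====
-- def run_sets (total, results, value):
--    temp = set([])
--    buckets = {}
--    # expert die, if given
--    if value[0] != -1:
--       temp.add(value[0])
--    # print results
--    for result in results:
--       if result not in buckets:
--          if result not in temp:
--             temp.add(result)
--          else:
--             buckets[result] = 2
--       else:
--          buckets[result] += 1
--    keys = [x for x in buckets.keys()]
--    keys.sort()
--    keys.reverse()
--    sets = ["{}W{}H".format(buckets[key], key) for key in keys]
--    singles = [x for x in temp if x not in buckets]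
--    return sets, "Singles: {}".format(" ".join([str(x) for x in sorted(singles)]))
-- ===== SOURCE B (Python) =====
-- def run_sets(total, results, value):
--     pool = sorted(results)
--     if value[0] != -1:
--         pool = sorted(pool + [value[0]])
--     sets = []
--     singles = []
--     i = 0
--     n = len(pool)
--     while i < n:
--         k = pool[i]
--         j = i + 1
--         while j < n and pool[j] == k:
--             j += 1
--         if j - i >= 2:
--             sets.append((j - i, k))
--         else:
--             singles.append(k)
--         i = j
--     return (["{}W{}H".format(c, k) for c, k in reversed(sets)],
--             "Singles: " + " ".join(str(x) for x in singles))
-- ===== Notes on version B (the rewrite author's own statement) =====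
-- stated objective: alternative
-- what changed: B uses no set or dict at all: it sorts the results (appending the expert die when value[0] != -1) and does one run-length scan over the sorted pool, emitting a formatted set for each run of length >= 2 (reversed at the end for descending order) and a single for each run of length 1.
import Mathlib
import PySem

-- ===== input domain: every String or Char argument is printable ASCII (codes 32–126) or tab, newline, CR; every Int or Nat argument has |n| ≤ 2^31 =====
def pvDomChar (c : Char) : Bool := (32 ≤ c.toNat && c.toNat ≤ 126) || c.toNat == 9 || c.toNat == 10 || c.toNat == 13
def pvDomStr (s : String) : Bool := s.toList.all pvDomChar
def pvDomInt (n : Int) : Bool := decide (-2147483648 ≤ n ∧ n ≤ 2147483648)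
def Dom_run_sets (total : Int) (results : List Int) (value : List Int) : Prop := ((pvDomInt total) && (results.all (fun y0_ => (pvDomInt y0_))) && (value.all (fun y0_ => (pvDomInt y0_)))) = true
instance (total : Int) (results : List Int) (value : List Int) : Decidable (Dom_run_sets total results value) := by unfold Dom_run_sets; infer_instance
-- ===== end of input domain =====

-- B drops A's set/dict bookkeeping entirely: it sorts the results (appending the expert die
-- when value[0] != -1) and does one run-length scan over the sorted pool — runs of length ≥ 2
-- become the formatted sets (reversed at the end for descending order), runs of length 1 the
-- singles. Objective: alternative (sort-then-scan instead of hash counting; same cost).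

-- ===== PORT A =====
-- the body of A's 'for result in results' loop, acting on the state (temp, buckets)
def runSetsStep (st : PySem.Set Int × PySem.Dict Int Int) (result : Int) :
    PySem.Set Int × PySem.Dict Int Int :=
  if st.2.contains result = false then
    if PySem.Set.contains st.1 result = false then (PySem.Set.add st.1 result, st.2)
    else (st.1, st.2.insert result 2)
  else (st.1, st.2.modify result 0 (· + 1))

def run_sets (total : Int) (results : List Int) (value : List Int) : List String × String :=
  let temp : PySem.Set Int := PySem.Set.empty
  let temp := if (PySem.List.pyGet? value 0).getD 0 ≠ -1 then
      PySem.Set.add temp ((PySem.List.pyGet? value 0).getD 0) else temp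
  let st := results.foldl runSetsStep (temp, PySem.Dict.empty)
  let keys := (PySem.List.sorted st.2.keys (fun x => x) false).reverse
  let sets := keys.map (fun key =>
      PySem.Int.toStr (st.2.getD key 0) ++ "W" ++ PySem.Int.toStr key ++ "H")
  let singles := st.1.filter (fun x => !(st.2.contains x))
  (sets, "Singles: " ++
    PySem.Str.join " " ((PySem.List.sorted singles (fun x => x) false).map PySem.Int.toStr))

-- ===== PORT B =====
-- B's outer while loop: consume one run (the inner 'while rest[j] == k' scan = takeWhile,
-- 'rest = rest[j:]' = dropWhile), collecting (run length, key) for runs ≥ 2 and the key alone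
-- for runs of length 1.
def scanRuns : List Int → List (Int × Int) × List Int
  | [] => ([], [])
  | k :: rest =>
    let run := rest.takeWhile (· == k)
    let p := scanRuns (rest.dropWhile (· == k))
    if 2 ≤ run.length + 1 then (((run.length : Int) + 1, k) :: p.1, p.2) else (p.1, k :: p.2)
termination_by s => s.length
decreasing_by
  simp only [List.length_cons]
  exact Nat.lt_succ_of_le (List.length_dropWhile_le _ rest)

def run_sets_alt (total : Int) (results : List Int) (value : List Int) : List String × String :=
  let pool := PySem.List.sorted results (fun x => x) false
  let v0 := (PySem.List.pyGet? value 0).getD 0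
  let pool := if v0 ≠ -1 then PySem.List.sorted (pool ++ [v0]) (fun x => x) false else pool
  let p := scanRuns pool
  (p.1.reverse.map (fun ck => PySem.Int.toStr ck.1 ++ "W" ++ PySem.Int.toStr ck.2 ++ "H"),
   "Singles: " ++ PySem.Str.join " " (p.2.map PySem.Int.toStr))

-- ===== PRECONDITION & SPEC =====
-- Python A evaluates value[0], so it raises IndexError exactly when value is empty; B does too.
def Pre_run_sets (total : Int) (results : List Int) (value : List Int) : Prop := value ≠ []
instance (total : Int) (results : List Int) (value : List Int) :
    Decidable (Pre_run_sets total results value) := by unfold Pre_run_sets; infer_instance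
def pvWitness_run_sets : Int × List Int × List Int := (0, [1, 1, 2], [3])

def Spec_run_sets (total : Int) (results : List Int) (value : List Int)
    (out : List String × String) : Prop := out = run_sets_alt total results value
instance (total : Int) (results : List Int) (value : List Int) (out : List String × String) :
    Decidable (Spec_run_sets total results value out) := by unfold Spec_run_sets; infer_instance

-- ===== CLAIM (what is proved, stated in full; the proofs are below) =====
def Claim_equal_run_sets : Prop := ∀ (total : Int) (results : List Int) (value : List Int),
  Dom_run_sets total results value → Pre_run_sets total results value →
  Spec_run_sets total results value (run_sets total results value)

-- ===== LEMMAS AND PROOFS =====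
lemma dict_get?_eq_ite (d : PySem.Dict Int Int) (k : Int) :
    d.get? k = if d.contains k = true then some (d.getD k 0) else none := by
  cases h : d.get? k <;>
    simp [PySem.Dict.getD_eq_get?_getD, PySem.Dict.contains_eq_isSome_get?, h]

lemma loopA_invariant (p : List Int) : ∀ (t : PySem.Set Int) (b : PySem.Dict Int Int)
    (c : Int → Int), t.Nodup → b.keys.Nodup → (∀ k, 0 ≤ c k) →
    (∀ k, k ∈ t ↔ 1 ≤ c k) →
    (∀ k, b.get? k = if 2 ≤ c k then some (c k) else none) →
    (p.foldl runSetsStep (t, b)).1.Nodup ∧ (p.foldl runSetsStep (t, b)).2.keys.Nodup ∧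
    (∀ k, k ∈ (p.foldl runSetsStep (t, b)).1 ↔ 1 ≤ c k + (p.count k : Int)) ∧
    (∀ k, (p.foldl runSetsStep (t, b)).2.get? k =
      if 2 ≤ c k + (p.count k : Int) then some (c k + (p.count k : Int)) else none) := by
  induction p with
  | nil => intro t b c ht hb hpos hmem hget; simpa using ⟨ht, hb, hmem, hget⟩
  | cons r p ih =>
    intro t b c ht hb hpos hmem hget
    have step : ∀ k : Int, c k + ((r :: p).count k : Int)
        = (c k + if k = r then 1 else 0) + (p.count k : Int) := by
      intro k
      rcases eq_or_ne k r with h | h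
      · simp [h]; ring
      · simp [h, Ne.symm h]
    have hpos' : ∀ k, 0 ≤ c k + if k = r then 1 else 0 := by
      intro k; split <;> have := hpos k <;> omega
    rw [List.foldl_cons]
    by_cases hbr : b.contains r = false
    · have hcr2 : ¬ 2 ≤ c r := by
        have := hget r
        rw [dict_get?_eq_ite, hbr] at this
        by_contra h2; rw [if_pos h2] at this; simp at this
      by_cases htr : PySem.Set.contains t r = false
      · -- fresh element: add to temp
        have hcr0 : c r = 0 := by
          have h1 : ¬ (1 ≤ c r) := by
            rw [← hmem r]; simpa [PySem.Set.contains_iff] using htr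
          have := hpos r; omega
        have hstep : runSetsStep (t, b) r = (PySem.Set.add t r, b) := by
          simp only [runSetsStep]; rw [hbr, htr]; simp
        rw [hstep]
        obtain ⟨h1, h2, h3, h4⟩ := ih (PySem.Set.add t r) b
          (fun k => c k + if k = r then 1 else 0) (PySem.Set.nodup_add t r ht) hb hpos'
          (by intro k
              rw [PySem.Set.mem_add, hmem k]
              rcases eq_or_ne k r with h | h <;> simp [h, hcr0])
          (by intro k
              rw [hget k]
              rcases eq_or_ne k r with h | h <;> simp [h, hcr0])
        exact ⟨h1, h2, fun k => by rw [step k]; exact h3 k, fun k => by rw [step k]; exact h4 k⟩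
      · -- second sighting: buckets[result] = 2
        have htr' : PySem.Set.contains t r = true := by simpa using htr
        have hcr1 : c r = 1 := by
          have h1 : 1 ≤ c r := (hmem r).1 (by simpa [PySem.Set.contains_iff] using htr')
          omega
        have hstep : runSetsStep (t, b) r = (t, b.insert r 2) := by
          simp only [runSetsStep]; rw [hbr, htr']; simp
        rw [hstep]
        obtain ⟨h1, h2, h3, h4⟩ := ih t (b.insert r 2)
          (fun k => c k + if k = r then 1 else 0) ht (PySem.Dict.nodup_keys_insert b r 2 hb) hpos'
          (by intro k; rw [hmem k]; rcases eq_or_ne k r with h | h <;> simp [h, hcr1])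
          (by intro k
              rw [PySem.Dict.get?_insert, hget k]
              rcases eq_or_ne k r with h | h <;> simp [h, hcr1])
        exact ⟨h1, h2, fun k => by rw [step k]; exact h3 k, fun k => by rw [step k]; exact h4 k⟩
    · -- already in buckets: increment
      have hbr' : b.contains r = true := by simpa using hbr
      have hcr2 : 2 ≤ c r := by
        have := hget r
        rw [dict_get?_eq_ite, hbr'] at this
        by_contra h2; rw [if_neg h2] at this; simp at this
      have hgr : b.getD r 0 = c r := by
        have := hget r
        rw [dict_get?_eq_ite, hbr', if_pos hcr2] at this
        simpa using this
      have hstep : runSetsStep (t, b) r = (t, b.modify r 0 (· + 1)) := by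
        simp only [runSetsStep]; rw [hbr']; simp
      rw [hstep]
      have hbk : (b.modify r 0 (· + 1)).keys.Nodup := by
        rw [PySem.Dict.keys_modify]
        exact PySem.Dict.nodup_keys_insert b r _ hb
      obtain ⟨h1, h2, h3, h4⟩ := ih t (b.modify r 0 (· + 1))
        (fun k => c k + if k = r then 1 else 0) ht hbk hpos'
        (by intro k; rw [hmem k]; rcases eq_or_ne k r with h | h <;> simp [h] <;> omega)
        (by intro k
            rw [dict_get?_eq_ite, PySem.Dict.getD_modify, PySem.Dict.contains_modify]
            rcases eq_or_ne k r with h | h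
            · simp [h, hgr]; omega
            · have hkr : (k == r) = false := by simp [h]
              rw [hkr]
              simp only [Bool.false_or]
              rw [if_neg h, ← dict_get?_eq_ite, hget k]
              simp [h])
      exact ⟨h1, h2, fun k => by rw [step k]; exact h3 k, fun k => by rw [step k]; exact h4 k⟩

def seedC (v0 k : Int) : Int := if v0 ≠ -1 ∧ k = v0 then 1 else 0
def totC (v0 : Int) (results : List Int) (k : Int) : Int := seedC v0 k + results.count k

lemma dropWhile_head_false {p : Int → Bool} :
    ∀ (l : List Int) (h : Int) (t : List Int), l.dropWhile p = h :: t → p h = false := by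
  intro l
  induction l with
  | nil => intro h t hl; simp at hl
  | cons a l ih =>
    intro h t hl
    rw [List.dropWhile_cons] at hl
    by_cases hp : p a = true
    · rw [if_pos hp] at hl; exact ih h t hl
    · rw [if_neg hp] at hl
      cases hl; simpa using hp

-- B's run scan over a ≤-sorted list, characterised by element counts.
lemma scanRuns_spec : ∀ (n : Nat) (s : List Int), s.length ≤ n → s.Pairwise (· ≤ ·) →
    ((scanRuns s).1.map Prod.snd).Pairwise (· < ·) ∧
    (∀ ck ∈ (scanRuns s).1, ck.1 = (s.count ck.2 : Int)) ∧
    (∀ k : Int, k ∈ (scanRuns s).1.map Prod.snd ↔ 2 ≤ s.count k) ∧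
    (scanRuns s).2.Pairwise (· < ·) ∧
    (∀ k : Int, k ∈ (scanRuns s).2 ↔ s.count k = 1) := by
  intro n
  induction n with
  | zero =>
    intro s hlen _
    have : s = [] := List.eq_nil_of_length_eq_zero (Nat.le_zero.mp hlen)
    subst this
    simp [scanRuns]
  | succ n ih =>
    intro s hlen hsort
    match s with
    | [] => simp [scanRuns]
    | k :: rest =>
      have hk : ∀ x ∈ rest, k ≤ x := fun x hx => (List.pairwise_cons.mp hsort).1 x hx
      have hrest : rest.Pairwise (· ≤ ·) := (List.pairwise_cons.mp hsort).2
      set run := rest.takeWhile (· == k) with hrun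
      set rest' := rest.dropWhile (· == k) with hrest'
      have hsplit : run ++ rest' = rest := List.takeWhile_append_dropWhile
      have hrunk : ∀ x ∈ run, x = k := by
        intro x hx
        have := List.mem_takeWhile_imp hx
        simpa using this
      have hrest'sub : ∀ x ∈ rest', x ∈ rest := by
        intro x hx; rw [← hsplit]; exact List.mem_append_right _ hx
      have hrest'sort : rest'.Pairwise (· ≤ ·) :=
        hrest.sublist (List.dropWhile_sublist _)
      have hgt : ∀ x ∈ rest', k < x := by
        rcases hr : rest' with _ | ⟨h, t⟩
        · intro x hx; simp at hx
        · intro x hx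
          have hh : (h == k) = false :=
            dropWhile_head_false rest h t (by rw [← hrest']; exact hr)
          have hhk : h ≠ k := by simpa using hh
          have hkh : k ≤ h := hk h (hrest'sub h (by rw [hr]; exact List.mem_cons_self))
          have hklt : k < h := lt_of_le_of_ne hkh (Ne.symm hhk)
          rcases List.mem_cons.mp hx with he | ht
          · exact he ▸ hklt
          · have : h ≤ x := (List.pairwise_cons.mp (hr ▸ hrest'sort)).1 x ht
            exact lt_of_lt_of_le hklt this
      have hnk : rest'.count k = 0 := by
        rw [List.count_eq_zero]
        intro hmem
        exact absurd rfl (ne_of_gt (hgt k hmem))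
      have hckk : (k :: rest).count k = run.length + 1 := by
        rw [← hsplit, List.count_cons_self, List.count_append, hnk,
          List.count_eq_length.mpr (fun x hx => by rw [hrunk x hx])]
      have hckne : ∀ k' : Int, k' ≠ k → (k :: rest).count k' = rest'.count k' := by
        intro k' hne
        have h1 : run.count k' = 0 := List.count_eq_zero.mpr (fun hm => hne (hrunk k' hm))
        rw [← hsplit, List.count_cons, List.count_append, h1]
        simp [Ne.symm hne]
      have hlen' : rest'.length ≤ n := by
        have h1 := List.length_dropWhile_le (fun x => x == k) rest
        rw [hrest']
        simp only [List.length_cons] at hlen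
        omega
      obtain ⟨ih1, ih2, ih3, ih4, ih5⟩ := ih rest' hlen' hrest'sort
      -- keys appearing in the recursive results lie in rest', hence are > k
      have hmemS : ∀ k' ∈ (scanRuns rest').1.map Prod.snd, k < k' := by
        intro k' hm
        have h2 : 2 ≤ rest'.count k' := (ih3 k').mp hm
        exact hgt k' (List.count_pos_iff.mp (by omega))
      have hmemG : ∀ k' ∈ (scanRuns rest').2, k < k' := by
        intro k' hm
        have h1 : rest'.count k' = 1 := (ih5 k').mp hm
        exact hgt k' (List.count_pos_iff.mp (by omega))
      have hunfold : scanRuns (k :: rest) =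
          if 2 ≤ run.length + 1 then
            (((run.length : Int) + 1, k) :: (scanRuns rest').1, (scanRuns rest').2)
          else ((scanRuns rest').1, k :: (scanRuns rest').2) := by
        rw [scanRuns]
      clear_value run rest'
      by_cases hcase : 2 ≤ run.length + 1
      · rw [hunfold, if_pos hcase]
        refine ⟨?_, ?_, ?_, ih4, ?_⟩
        · simp only [List.map_cons, List.pairwise_cons]
          exact ⟨hmemS, ih1⟩
        · intro ck hm
          rcases List.mem_cons.mp hm with he | ht
          · subst he; simp [hckk]
          · rw [ih2 ck ht, hckne ck.2 (ne_of_gt (hmemS ck.2 (List.mem_map_of_mem ht)))]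
        · intro k'
          rcases eq_or_ne k' k with he | hne
          · rw [he]
            have h2 : 2 ≤ (k :: rest).count k := by rw [hckk]; omega
            simp only [List.map_cons, List.mem_cons]
            constructor
            · intro _; exact h2
            · intro _; exact Or.inl trivial
          · simp only [List.map_cons, List.mem_cons]
            rw [hckne k' hne, ih3 k']
            simp [hne]
        · intro k'
          rcases eq_or_ne k' k with he | hne
          · rw [he, ih5 k, hnk, hckk]
            omega
          · rw [ih5 k', hckne k' hne]
      · rw [hunfold, if_neg hcase]
        have hrun0 : run.length = 0 := by omega
        refine ⟨ih1, ?_, ?_, ?_, ?_⟩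
        · intro ck hm
          rw [ih2 ck hm, hckne ck.2 (ne_of_gt (hmemS ck.2 (List.mem_map_of_mem hm)))]
        · intro k'
          rcases eq_or_ne k' k with he | hne
          · rw [he, ih3 k, hnk, hckk, hrun0]
            simp
          · rw [ih3 k', hckne k' hne]
        · exact List.pairwise_cons.mpr ⟨hmemG, ih4⟩
        · intro k'
          rcases eq_or_ne k' k with he | hne
          · rw [he, List.mem_cons, ih5 k, hnk, hckk, hrun0]
            simp
          · rw [List.mem_cons, ih5 k', hckne k' hne]
            simp [hne]

theorem run_sets_eq_alt (total : Int) (results : List Int) (value : List Int) :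
    run_sets total results value = run_sets_alt total results value := by
  simp only [run_sets, run_sets_alt]
  set v0 : Int := (PySem.List.pyGet? value 0).getD 0 with hv0
  set t0 : PySem.Set Int := if v0 ≠ -1 then PySem.Set.add PySem.Set.empty v0 else PySem.Set.empty with ht0
  set Ck := totC v0 results with hCk
  have hposC : ∀ k, 0 ≤ Ck k := by
    intro k; simp only [hCk, totC, seedC]; split <;> positivity
  -- A-side invariant instantiation
  have ht0nd : t0.Nodup := by
    rw [ht0]; split
    · exact PySem.Set.nodup_add _ _ (by simp [PySem.Set.empty])
    · simp [PySem.Set.empty]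
  have hmem0 : ∀ k, k ∈ t0 ↔ 1 ≤ seedC v0 k := by
    intro k
    rw [ht0]; simp only [seedC]
    by_cases h : v0 = -1
    · simp [h, PySem.Set.empty]
    · rw [if_pos h]
      rcases eq_or_ne k v0 with he | he <;>
        simp [he, h, PySem.Set.empty]
  have hget0 : ∀ k, (PySem.Dict.empty : PySem.Dict Int Int).get? k =
      if 2 ≤ seedC v0 k then some (seedC v0 k) else none := by
    intro k
    have : ¬ 2 ≤ seedC v0 k := by simp only [seedC]; split <;> omega
    simp [this, PySem.Dict.get?_empty]
  have hpos0 : ∀ k, 0 ≤ seedC v0 k := by intro k; simp only [seedC]; split <;> omega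
  set st := results.foldl runSetsStep (t0, PySem.Dict.empty) with hst
  obtain ⟨hn1, hn2, hmemF, hgetF⟩ := loopA_invariant results t0 PySem.Dict.empty (seedC v0)
    ht0nd (by simp) hpos0 hmem0 hget0
  replace hmemF : ∀ k, k ∈ st.1 ↔ 1 ≤ Ck k := hmemF
  replace hgetF : ∀ k, st.2.get? k = if 2 ≤ Ck k then some (Ck k) else none := hgetF
  have hkA : ∀ k, k ∈ st.2.keys ↔ 2 ≤ Ck k := by
    intro k
    rw [← PySem.Dict.contains_iff_mem_keys, PySem.Dict.contains_eq_isSome_get?, hgetF k]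
    by_cases h2 : 2 ≤ Ck k <;> simp [h2]
  have hgdA : ∀ k, 2 ≤ Ck k → st.2.getD k 0 = Ck k := by
    intro k h2
    rw [PySem.Dict.getD_eq_get?_getD, hgetF k, if_pos h2]
    rfl
  have hcontA : ∀ k, st.2.contains k = decide (2 ≤ Ck k) := by
    intro k
    rw [PySem.Dict.contains_eq_isSome_get?, hgetF k]
    by_cases h2 : 2 ≤ Ck k <;> simp [h2]
  -- B-side pool
  set pool : List Int := if v0 ≠ -1 then
      PySem.List.sorted (PySem.List.sorted results (fun x => x) false ++ [v0]) (fun x => x) false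
    else PySem.List.sorted results (fun x => x) false with hpool
  have hpoolsort : pool.Pairwise (· ≤ ·) := by
    rw [hpool]; split <;> exact PySem.List.sorted_pairwise _ _
  have hpoolcount : ∀ k, (pool.count k : Int) = Ck k := by
    intro k
    rw [hpool, hCk]
    simp only [totC, seedC]
    by_cases h : v0 ≠ -1
    · rw [if_pos h]
      have hperm : (PySem.List.sorted (PySem.List.sorted results (fun x => x) false ++ [v0])
          (fun x => x) false).Perm (results ++ [v0]) :=
        (PySem.List.sorted_perm _ _ _).trans
          (((PySem.List.sorted_perm results (fun x => x) false)).append_right [v0])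
      rw [hperm.count_eq, List.count_append]
      rcases eq_or_ne k v0 with he | hne
      · have h1 : List.count k [v0] = 1 := by simp [he]
        rw [h1]
        simp [he, h]
        ring
      · have h1 : List.count k [v0] = 0 := by rw [List.count_eq_zero]; simp [hne]
        rw [h1]
        simp [hne]
    · rw [if_neg h]
      rw [(PySem.List.sorted_perm results (fun x => x) false).count_eq]
      simp at h
      simp [h]
  obtain ⟨hB1, hB2, hB3, hB4, hB5⟩ :=
    scanRuns_spec pool.length pool le_rfl hpoolsort
  -- translate B's count facts to Ck
  have hB3' : ∀ k, k ∈ (scanRuns pool).1.map Prod.snd ↔ 2 ≤ Ck k := by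
    intro k; rw [hB3 k, ← hpoolcount k]; omega
  have hB5' : ∀ k, k ∈ (scanRuns pool).2 ↔ Ck k = 1 := by
    intro k; rw [hB5 k, ← hpoolcount k]; omega
  have hB2' : ∀ ck ∈ (scanRuns pool).1, ck.1 = Ck ck.2 := by
    intro ck hm; rw [hB2 ck hm, hpoolcount]
  -- nodups from strict pairwise
  have hndS : ((scanRuns pool).1.map Prod.snd).Nodup := hB1.imp ne_of_lt
  have hndG : ((scanRuns pool).2).Nodup := hB4.imp ne_of_lt
  -- sets: A's descending key list = reverse of B's run keys
  have hkeysB : PySem.List.sorted st.2.keys (fun x => x) false = (scanRuns pool).1.map Prod.snd := by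
    apply PySem.List.sorted_eq_of_perm_of_pairwise_lt
    · rw [List.perm_ext_iff_of_nodup hndS hn2]
      intro k; rw [hB3' k, hkA k]
    · exact hB1
  -- singles: A's sorted filtered temp = B's singles
  have hsingles : PySem.List.sorted (st.1.filter (fun x => !(st.2.contains x))) (fun x => x) false
      = (scanRuns pool).2 := by
    apply PySem.List.sorted_eq_of_perm_of_pairwise_lt
    · rw [List.perm_ext_iff_of_nodup hndG (hn1.filter _)]
      intro k
      rw [hB5' k, List.mem_filter, hmemF k, hcontA k]
      constructor
      · intro h1; exact ⟨by omega, by simp; omega⟩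
      · rintro ⟨h1, h2⟩
        simp only [Bool.not_eq_eq_eq_not, Bool.not_true, decide_eq_false_iff_not] at h2
        omega
    · exact hB4
  simp only [Prod.mk.injEq]
  constructor
  · rw [hkeysB, ← List.map_reverse, List.map_map]
    apply List.map_congr_left
    intro ck hm
    rw [List.mem_reverse] at hm
    simp only [Function.comp_apply]
    rw [hgdA ck.2 ((hB3' ck.2).mp (List.mem_map_of_mem hm)), ← hB2' ck hm]
  · rw [hsingles]

-- ===== VERDICT (by name: the statement is the Claim_ definition above) =====
theorem run_sets_spec : Claim_equal_run_sets := by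
  intro total results value _ _
  exact run_sets_eq_alt total results value
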